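-- pv_equiv track=rewrite | github.com/GrowthSociety-GS/growth-cro | growthcro/recos/cli.py | _looks_like_legacy_invocation
-- ===== SOURCE A (Python) =====
-- def _looks_like_legacy_invocation(argv: list[str]) -> str | None:
--     """Return 'prepare' | 'enrich' | None depending on legacy flags present.
--
--     The historical CLIs were:
--       reco_enricher_v13.py     ... --prepare ...        → prepare
--       reco_enricher_v13_api.py ... [--dry-run|--all] ... → enrich
--     """
--     if not argv:
--         return None
--     if argv[0] in {"prepare", "enrich", "view"}:
--         return None  # already a subcommand, not legacy
--     if "--prepare" in argv:
--         return "prepare"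
--     # Heuristic: --dry-run / --model / --max-concurrent are enrich-only.
--     if any(flag in argv for flag in ("--dry-run", "--model", "--max-concurrent", "--force")):
--         return "enrich"
--     # Last resort: if --all or --client/--page passed without --prepare, default to prepare
--     # (the old reco_enricher_v13.py default behaviour).
--     if any(flag in argv for flag in ("--all", "--pages-file", "--client", "--page")):
--         return "prepare"
--     return None
-- ===== SOURCE B (Python) =====
-- def _looks_like_legacy_invocation(argv: list[str]) -> str | None:
--     if not argv:
--         return None
--     if argv[0] in {"prepare", "enrich", "view"}:
--         return None
--     saw_prepare = saw_enrich = saw_default = False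
--     for arg in argv:
--         if arg == "--prepare":
--             saw_prepare = True
--         elif arg in {"--dry-run", "--model", "--max-concurrent", "--force"}:
--             saw_enrich = True
--         elif arg in {"--all", "--pages-file", "--client", "--page"}:
--             saw_default = True
--     if saw_prepare:
--         return "prepare"
--     if saw_enrich:
--         return "enrich"
--     if saw_default:
--         return "prepare"
--     return None
-- ===== Notes on version B (the rewrite author's own statement) =====
-- stated objective: alternative
-- what changed: Replaces the four separate membership scans over argv with a single pass that records three booleans (prepare / enrich-only / default flags) and decides once afterwards in the original precedence.
import Mathlib
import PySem

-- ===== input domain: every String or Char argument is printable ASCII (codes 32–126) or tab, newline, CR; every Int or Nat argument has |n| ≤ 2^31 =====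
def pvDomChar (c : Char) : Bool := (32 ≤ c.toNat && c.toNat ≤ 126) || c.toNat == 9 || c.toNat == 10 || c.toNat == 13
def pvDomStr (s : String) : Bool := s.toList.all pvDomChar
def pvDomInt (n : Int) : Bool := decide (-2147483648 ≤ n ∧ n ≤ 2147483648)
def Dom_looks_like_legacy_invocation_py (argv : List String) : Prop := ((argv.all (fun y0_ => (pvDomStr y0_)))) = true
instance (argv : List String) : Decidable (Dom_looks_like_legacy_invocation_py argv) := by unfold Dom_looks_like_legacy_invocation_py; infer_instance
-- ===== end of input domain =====

-- B replaces A's four separate membership scans over argv with one pass accumulating three booleans, decided once in A's precedence (objective: alternative; same asymptotic cost).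


-- ===== PORT A =====
-- Port of A: four separate membership scans over argv, in the original branch order.
def pvSubcmds : List String := ["prepare", "enrich", "view"]
def pvEnrichFlags : List String := ["--dry-run", "--model", "--max-concurrent", "--force"]
def pvDefaultFlags : List String := ["--all", "--pages-file", "--client", "--page"]

def looks_like_legacy_invocation_py (argv : List String) : Option String :=
  match argv with
  | [] => none
  | a0 :: _ =>
    if pvSubcmds.contains a0 then none
    else if argv.contains "--prepare" then some "prepare"
    else if pvEnrichFlags.any (fun flag => argv.contains flag) then some "enrich"
    else if pvDefaultFlags.any (fun flag => argv.contains flag) then some "prepare"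
    else none

-- ===== PORT B =====
-- Port of B: one pass over argv accumulating three booleans, then one decision.
def pvScanStep (s : Bool × Bool × Bool) (arg : String) : Bool × Bool × Bool :=
  if arg == "--prepare" then (true, s.2.1, s.2.2)
  else if pvEnrichFlags.contains arg then (s.1, true, s.2.2)
  else if pvDefaultFlags.contains arg then (s.1, s.2.1, true)
  else s

def looks_like_legacy_invocation_py_alt (argv : List String) : Option String :=
  match argv with
  | [] => none
  | a0 :: _ =>
    if pvSubcmds.contains a0 then none
    else
      let st := argv.foldl pvScanStep (false, false, false)
      if st.1 then some "prepare"
      else if st.2.1 then some "enrich"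
      else if st.2.2 then some "prepare"
      else none

-- ===== PRECONDITION & SPEC =====
def Spec_looks_like_legacy_invocation_py (argv : List String) (out : Option String) : Prop := out = looks_like_legacy_invocation_py_alt argv
instance (argv : List String) (out : Option String) : Decidable (Spec_looks_like_legacy_invocation_py argv out) := by unfold Spec_looks_like_legacy_invocation_py; infer_instance

-- ===== CLAIM (what is proved, stated in full; the proofs are below) =====
def Claim_equal_looks_like_legacy_invocation_py : Prop := ∀ (argv : List String), Dom_looks_like_legacy_invocation_py argv → Spec_looks_like_legacy_invocation_py argv (looks_like_legacy_invocation_py argv)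

-- ===== LEMMAS AND PROOFS =====

-- ===== VERDICT (by name: the statement is the Claim_ definition above) =====
lemma pvFold_char (l : List String) (p e d : Bool) :
    l.foldl pvScanStep (p, e, d) =
      (p || l.any (fun a => a == "--prepare"),
       e || l.any (fun a => !(a == "--prepare") && pvEnrichFlags.contains a),
       d || l.any (fun a => !(a == "--prepare") && !(pvEnrichFlags.contains a) && pvDefaultFlags.contains a)) := by
  induction l generalizing p e d with
  | nil => simp
  | cons a t ih =>
    simp only [List.foldl_cons, List.any_cons, pvScanStep]
    by_cases hp : a = "--prepare"
    · subst hp; simp [ih]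
    · have hb : (a == "--prepare") = false := by simp [hp]
      rw [hb]
      by_cases he : a ∈ pvEnrichFlags
      · simp [he, ih]
      · by_cases hd : a ∈ pvDefaultFlags
        · simp [he, hd, ih]
        · simp [he, hd, ih]

lemma pvE_drop (l : List String) :
    l.any (fun a => !(a == "--prepare") && pvEnrichFlags.contains a)
      = l.any (fun a => pvEnrichFlags.contains a) := by
  congr 1
  funext a
  by_cases hp : a = "--prepare"
  · subst hp; decide
  · simp [hp]

lemma pvD_drop (l : List String) :
    l.any (fun a => !(a == "--prepare") && !(pvEnrichFlags.contains a) && pvDefaultFlags.contains a)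
      = l.any (fun a => pvDefaultFlags.contains a) := by
  congr 1
  funext a
  by_cases hp : a = "--prepare"
  · subst hp; decide
  · by_cases he : a ∈ pvEnrichFlags
    · have hd : a ∉ pvDefaultFlags := by fin_cases he <;> decide
      simp [he, hd]
    · simp [hp, he]

lemma pvContains_eq_any (l : List String) (x : String) : l.contains x = l.any (fun a => a == x) := by
  induction l with
  | nil => rfl
  | cons b t ih =>
    simp only [List.contains_cons, List.any_cons]
    rw [← ih]
    congr 1
    rw [Bool.eq_iff_iff]
    simp only [beq_iff_eq]
    exact eq_comm

lemma pvAny_swap (fs l : List String) :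
    fs.any (fun f => l.contains f) = l.any (fun a => fs.contains a) := by
  rw [Bool.eq_iff_iff]
  simp only [List.any_eq_true, List.contains_iff_mem]
  tauto

theorem looks_like_legacy_invocation_py_spec : Claim_equal_looks_like_legacy_invocation_py := by
  intro argv _
  unfold Spec_looks_like_legacy_invocation_py looks_like_legacy_invocation_py looks_like_legacy_invocation_py_alt
  match argv with
  | [] => rfl
  | a0 :: t =>
    by_cases hs : a0 ∈ pvSubcmds
    · simp [hs]
    · have hs' : pvSubcmds.contains a0 = false := by simpa using hs
      simp only [hs', Bool.false_eq_true, if_false]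
      rw [pvFold_char]
      simp only [Bool.false_or, pvE_drop, pvD_drop, pvAny_swap]
      rw [pvContains_eq_any]
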